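-- pv_equiv track=rewrite | github.com/gbn0/t1IA | main.py | select_next_cell
-- ===== SOURCE A (Python) =====
-- def select_next_cell(grid):
--     best_cell = None
--     max_options = float('-inf')
--
--     for row in range(len(grid)):
--         for col in range(len(grid[0])):
--             if grid[row][col] == '?':
--                 horizontal_length = vertical_length = 0
--
--                 for i in range(col, len(grid[0])):
--                     if grid[row][i] == '?':
--                         horizontal_length += 1
--                     else:
--                         break
--
--                 for i in range(row, len(grid)):
--                     if grid[i][col] == '?':
--                         vertical_length += 1
--                     else:
--                         break
--
--                 max_local = max(horizontal_length, vertical_length)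
--                 if max_local > max_options:
--                     max_options = max_local
--                     best_cell = (row, col)
--
--     return best_cell
-- ===== SOURCE B (Python) =====
-- def _runs_right(row):
--     # suffix run lengths of True, computed right-to-left
--     out = []
--     run = 0
--     for v in reversed(row):
--         run = run + 1 if v else 0
--         out.append(run)
--     out.reverse()
--     return out
--
--
-- def select_next_cell(grid):
--     if not grid:
--         return None
--     W = len(grid[0])
--     q = [[cell == '?' for cell in row[:W]] for row in grid]
--     right = [_runs_right(r) for r in q]
--     down_rev = []
--     nxt = [0] * W
--     for r in reversed(q):
--         nxt = [nxt[c] + 1 if r[c] else 0 for c in range(W)]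
--         down_rev.append(nxt)
--     down = list(reversed(down_rev))
--     best = None
--     best_v = 0
--     for r in range(len(q)):
--         for c in range(W):
--             if q[r][c]:
--                 m = max(right[r][c], down[r][c])
--                 if best_v < m:
--                     best_v = m
--                     best = (r, c)
--     return best
-- ===== Notes on version B (the rewrite author's own statement) =====
-- stated objective: alternative
-- what changed: Per-'?'-cell rightward/downward rescans are replaced by two run-length tables computed once by reverse dynamic programming, then a single row-major argmax pass; this trades A's O(R*C*(R+C)) worst case for O(R*C) always, at a constant-factor table-building cost on sparse grids.
import Mathlib
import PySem

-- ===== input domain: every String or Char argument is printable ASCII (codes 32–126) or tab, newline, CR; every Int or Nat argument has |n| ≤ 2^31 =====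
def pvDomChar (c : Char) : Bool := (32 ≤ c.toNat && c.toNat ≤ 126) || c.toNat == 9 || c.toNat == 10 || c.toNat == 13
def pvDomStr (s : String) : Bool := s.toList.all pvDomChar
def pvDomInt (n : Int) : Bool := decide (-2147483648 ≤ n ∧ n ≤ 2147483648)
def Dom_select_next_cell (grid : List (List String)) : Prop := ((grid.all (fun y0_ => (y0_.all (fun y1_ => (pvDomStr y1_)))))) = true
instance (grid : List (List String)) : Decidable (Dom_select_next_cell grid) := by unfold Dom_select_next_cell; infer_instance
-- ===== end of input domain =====

-- B replaces A's per-'?'-cell rightward/downward rescans by two run-length tables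
-- (reverse dynamic programming) computed once, then a single row-major argmax pass.

-- ===== PORT A =====
-- grid[r][c] (Nat loop indices; in range on every input admitted by Pre_)
def pyCellA (grid : List (List String)) (r c : Nat) : String := (grid.getD r []).getD c ""

-- the 'for i in range(start, start+fuel): if cells i == '?': n += 1 else: break' loop
def runLenA (cells : Nat → String) : Nat → Nat → Int
  | _, 0 => 0
  | i, Nat.succ n => if cells i = "?" then 1 + runLenA cells (i + 1) n else 0

-- body of A's inner (column) loop; state = (best_cell, max_options), none = float('-inf')
def innerA (grid : List (List String)) (R W r : Nat)
    (st : Option (Int × Int) × Option Int) (c : Nat) : Option (Int × Int) × Option Int :=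
  if pyCellA grid r c = "?" then
    let h := runLenA (fun i => pyCellA grid r i) c (W - c)
    let v := runLenA (fun i => pyCellA grid i c) r (R - r)
    let ml := max h v
    match st.2 with
    | none => (some ((r : Int), (c : Int)), some ml)
    | some m => if m < ml then (some ((r : Int), (c : Int)), some ml) else st
  else st

def select_next_cell (grid : List (List String)) : Option (Int × Int) :=
  ((List.range grid.length).foldl
    (fun st r =>
      (List.range (grid.headD []).length).foldl
        (innerA grid grid.length (grid.headD []).length r) st)
    (none, none)).1

-- ===== PORT B =====
-- _runs_right: suffix run lengths of True, right-to-left (the reversed loop = foldr)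
def runsRightB (bs : List Bool) : List Int :=
  bs.foldr (fun v acc => (if v then acc.headD 0 + 1 else 0) :: acc) []

-- the 'for r in reversed(q)' loop carrying nxt (bottom row sees nxt = [0]*W)
def downRowsB (W : Nat) : List (List Bool) → List (List Int)
  | [] => []
  | row :: rest =>
      let below := downRowsB W rest
      ((List.range W).map fun c =>
        if row.getD c false then (below.headD []).getD c 0 + 1 else 0) :: below

-- body of B's inner (column) loop; state = (best, best_v)
def innerB (q : List (List Bool)) (right down : List (List Int)) (r : Nat)
    (st : Option (Int × Int) × Int) (c : Nat) : Option (Int × Int) × Int :=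
  if (q.getD r []).getD c false then
    let m := max ((right.getD r []).getD c 0) ((down.getD r []).getD c 0)
    if st.2 < m then (some ((r : Int), (c : Int)), m) else st
  else st

def select_next_cell_alt (grid : List (List String)) : Option (Int × Int) :=
  if grid.isEmpty then none
  else
  let W := (grid.headD []).length
  let q := grid.map fun row => (row.take W).map (fun s => s == "?")
  let right := q.map runsRightB
  let down := downRowsB W q
  ((List.range grid.length).foldl
    (fun st r => (List.range W).foldl (innerB q right down r) st)
    (none, 0)).1

-- ===== PRECONDITION & SPEC =====
-- A indexes every nonempty grid's rows at all columns 0..len(grid[0])-1, so it raises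
-- IndexError exactly when some row is shorter than row 0; those inputs are excluded.
def Pre_select_next_cell (grid : List (List String)) : Prop :=
  ∀ row ∈ grid, (grid.headD []).length ≤ row.length
instance (grid : List (List String)) : Decidable (Pre_select_next_cell grid) := by
  unfold Pre_select_next_cell; infer_instance

def pvWitness_select_next_cell : List (List String) := [["?", "."], [".", "?"]]

def Spec_select_next_cell (grid : List (List String)) (out : Option (Int × Int)) : Prop := out = select_next_cell_alt grid
instance (grid : List (List String)) (out : Option (Int × Int)) : Decidable (Spec_select_next_cell grid out) := by unfold Spec_select_next_cell; infer_instance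

-- ===== CLAIM (what is proved, stated in full; the proofs are below) =====
def Claim_equal_select_next_cell : Prop := ∀ (grid : List (List String)), Dom_select_next_cell grid → Pre_select_next_cell grid → Spec_select_next_cell grid (select_next_cell grid)

-- ===== LEMMAS AND PROOFS =====

-- count of leading trues (the common value both run computations reduce to)
def ctrue : List Bool → Int
  | [] => 0
  | b :: t => if b then 1 + ctrue t else 0

theorem runLenA_nonneg (cells : Nat → String) (i n : Nat) : 0 ≤ runLenA cells i n := by
  induction n generalizing i with
  | zero => simp [runLenA]
  | succ n ih =>
    simp only [runLenA]
    split
    · have := ih (i + 1); omega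
    · omega

theorem runsRightB_getD (bs : List Bool) (c : Nat) :
    (runsRightB bs).getD c 0 = ctrue (bs.drop c) := by
  induction bs generalizing c with
  | nil => simp [runsRightB, ctrue]
  | cons v t ih =>
    have hcons : runsRightB (v :: t) =
        (if v then (runsRightB t).headD 0 + 1 else 0) :: runsRightB t := rfl
    cases c with
    | zero =>
      have h0 : (runsRightB t).headD 0 = ctrue t := by
        have := ih 0
        rw [List.drop_zero] at this
        cases hrt : runsRightB t <;> rw [hrt] at this <;> simpa using this
      rw [hcons, List.getD_cons_zero, List.drop_zero]
      simp only [ctrue]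
      rw [h0]
      split <;> omega
    | succ c => rw [hcons]; simpa using ih c

theorem downRowsB_getD (W : Nat) (q : List (List Bool)) (r c : Nat) (hc : c < W) :
    ((downRowsB W q).getD r []).getD c 0 =
      ctrue ((q.drop r).map fun row => row.getD c false) := by
  induction q generalizing r with
  | nil => simp [downRowsB, ctrue]
  | cons row rest ih =>
    cases r with
    | zero =>
      have hhead : ((downRowsB W rest).headD []).getD c 0 =
          ctrue (rest.map fun row => row.getD c false) := by
        cases rest with
        | nil => simp [downRowsB, ctrue]
        | cons a l =>
          have := ih 0
          rw [List.drop_zero] at this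
          have hd : downRowsB W (a :: l) =
              ((List.range W).map fun c =>
                if a.getD c false then ((downRowsB W l).headD []).getD c 0 + 1 else 0)
                :: downRowsB W l := rfl
          rw [hd, List.headD_cons]
          rw [hd, List.getD_cons_zero] at this
          exact this
      have hstep : downRowsB W (row :: rest) =
          ((List.range W).map fun c =>
            if row.getD c false then ((downRowsB W rest).headD []).getD c 0 + 1 else 0)
            :: downRowsB W rest := rfl
      rw [List.drop_zero, List.map_cons, hstep, List.getD_cons_zero]
      rw [List.getD_eq_getElem _ _ (by simpa using hc)]
      simp only [List.getElem_map, List.getElem_range, ctrue]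
      rw [hhead]
      split <;> omega
    | succ r =>
      simp only [downRowsB]
      simpa using ih r

-- the state relation: same best cell; max_options none ↔ best_v 0, else equal and ≥ 1
def RelSt (s : Option (Int × Int) × Option Int) (t : Option (Int × Int) × Int) : Prop :=
  s.1 = t.1 ∧ ((s.2 = none ∧ t.2 = 0) ∨ (s.2 = some t.2 ∧ 1 ≤ t.2))

-- the q table of a grid (identical to the let-bound q in select_next_cell_alt)
def qOf (grid : List (List String)) : List (List Bool) :=
  grid.map fun row => (row.take (grid.headD []).length).map (fun s => s == "?")

theorem qOf_getD (grid : List (List String))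
    (hW : ∀ row ∈ grid, (grid.headD []).length ≤ row.length)
    (r c : Nat) (hr : r < grid.length) (hc : c < (grid.headD []).length) :
    ((qOf grid).getD r []).getD c false = (pyCellA grid r c == "?") := by
  have hrow : grid.getD r [] = grid[r] := List.getD_eq_getElem _ _ hr
  have hlen : (grid.headD []).length ≤ grid[r].length := hW _ (List.getElem_mem hr)
  have hq : (qOf grid).getD r []
      = ((grid[r].take (grid.headD []).length).map (fun s => s == "?")) := by
    unfold qOf
    rw [List.getD_eq_getElem _ _ (by simpa using hr), List.getElem_map]
  rw [hq]
  have hc' : c < ((grid[r].take (grid.headD []).length).map (fun s => s == "?")).length := by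
    rw [List.length_map, List.length_take]; omega
  rw [List.getD_eq_getElem _ _ hc']
  simp only [List.getElem_map]
  rw [List.getElem_take]
  unfold pyCellA
  rw [hrow, List.getD_eq_getElem _ _ (by omega)]

theorem runLenA_eq_ctrue_row (grid : List (List String))
    (hW : ∀ row ∈ grid, (grid.headD []).length ≤ row.length)
    (r : Nat) (hr : r < grid.length) (c : Nat) :
    runLenA (fun i => pyCellA grid r i) c ((grid.headD []).length - c) =
      ctrue (((qOf grid).getD r []).drop c) := by
  set W := (grid.headD []).length with hWdef
  have hqlen : ((qOf grid).getD r []).length = W := by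
    unfold qOf
    rw [List.getD_eq_getElem _ _ (by simpa using hr)]
    simp only [List.getElem_map, List.length_map, List.length_take]
    have := hW _ (List.getElem_mem hr); omega
  obtain ⟨n, hn⟩ : ∃ n, n = W - c := ⟨W - c, rfl⟩
  rw [← hn]
  induction n generalizing c with
  | zero =>
    have : W ≤ c := by omega
    rw [List.drop_eq_nil_of_le (by omega)]
    simp [runLenA, ctrue]
  | succ n ih =>
    have hc : c < W := by omega
    have hdrop : ((qOf grid).getD r []).drop c =
        ((qOf grid).getD r [])[c] :: ((qOf grid).getD r []).drop (c + 1) :=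
      List.drop_eq_getElem_cons (by omega)
    rw [hdrop]
    simp only [runLenA, ctrue]
    have hcell : ((qOf grid).getD r [])[c]'(by omega) = (pyCellA grid r c == "?") := by
      have h2 := qOf_getD grid hW r c hr hc
      rwa [List.getD_eq_getElem _ _ (by omega)] at h2
    rw [hcell]
    by_cases hx : pyCellA grid r c = "?"
    · simp only [hx]
      simp only [BEq.rfl, if_pos]
      rw [ih (c + 1) (by omega)]
    · rw [if_neg hx]
      have : (pyCellA grid r c == "?") = false := by simpa using hx
      simp [this]

theorem runLenA_eq_ctrue_col (grid : List (List String))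
    (hW : ∀ row ∈ grid, (grid.headD []).length ≤ row.length)
    (c : Nat) (hc : c < (grid.headD []).length) (r : Nat) :
    runLenA (fun i => pyCellA grid i c) r (grid.length - r) =
      ctrue (((qOf grid).drop r).map fun row => row.getD c false) := by
  have hqlen : (qOf grid).length = grid.length := by unfold qOf; simp
  obtain ⟨n, hn⟩ : ∃ n, n = grid.length - r := ⟨_, rfl⟩
  rw [← hn]
  induction n generalizing r with
  | zero =>
    rw [List.drop_eq_nil_of_le (by omega)]
    simp [runLenA, ctrue]
  | succ n ih =>
    have hr : r < grid.length := by omega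
    have hdrop : (qOf grid).drop r = (qOf grid)[r]'(by omega) :: (qOf grid).drop (r + 1) :=
      List.drop_eq_getElem_cons (by omega)
    rw [hdrop]
    simp only [runLenA, List.map_cons, ctrue]
    have hcell : ((qOf grid)[r]'(by omega)).getD c false = (pyCellA grid r c == "?") := by
      have h2 := qOf_getD grid hW r c hr hc
      have hgd : (qOf grid).getD r [] = (qOf grid)[r]'(by omega) :=
        List.getD_eq_getElem _ _ (by omega)
      rwa [hgd] at h2
    rw [hcell]
    by_cases hx : pyCellA grid r c = "?"
    · simp only [hx, BEq.rfl, if_pos]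
      rw [ih (r + 1) (by omega)]
    · rw [if_neg hx]
      have : (pyCellA grid r c == "?") = false := by simpa using hx
      simp [this]

theorem step_rel (grid : List (List String))
    (hW : ∀ row ∈ grid, (grid.headD []).length ≤ row.length)
    (r c : Nat) (hr : r < grid.length) (hc : c < (grid.headD []).length)
    (s : Option (Int × Int) × Option Int) (t : Option (Int × Int) × Int)
    (hrel : RelSt s t) :
    RelSt (innerA grid grid.length (grid.headD []).length r s c)
          (innerB (qOf grid) ((qOf grid).map runsRightB)
                  (downRowsB (grid.headD []).length (qOf grid)) r t c) := by
  have hcell := qOf_getD grid hW r c hr hc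
  have hrq : r < (qOf grid).length := by unfold qOf; simpa using hr
  have hgetd : (qOf grid).getD r [] = (qOf grid)[r] := List.getD_eq_getElem _ _ hrq
  have hright : (((qOf grid).map runsRightB).getD r []).getD c 0
      = ctrue (((qOf grid).getD r []).drop c) := by
    have hmap : ((qOf grid).map runsRightB).getD r [] = runsRightB ((qOf grid).getD r []) := by
      rw [List.getD_eq_getElem _ _ (by simpa using hrq), List.getElem_map, hgetd]
    rw [hmap, runsRightB_getD]
  have hdown := downRowsB_getD (grid.headD []).length (qOf grid) r c hc
  have hh := runLenA_eq_ctrue_row grid hW r hr c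
  have hv := runLenA_eq_ctrue_col grid hW c hc r
  obtain ⟨s1, s2⟩ := s
  obtain ⟨t1, t2⟩ := t
  obtain ⟨hb, hrest⟩ := hrel
  simp only at hb
  by_cases hx : pyCellA grid r c = "?"
  · have hq : ((qOf grid).getD r []).getD c false = true := by rw [hcell]; simpa using hx
    have hmeq : max (runLenA (fun i => pyCellA grid r i) c ((grid.headD []).length - c))
        (runLenA (fun i => pyCellA grid i c) r (grid.length - r))
        = max ((((qOf grid).map runsRightB).getD r []).getD c 0)
              (((downRowsB (grid.headD []).length (qOf grid)).getD r []).getD c 0) := by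
      rw [hright, hdown, hh, hv]
    have hpos : 1 ≤ max (runLenA (fun i => pyCellA grid r i) c ((grid.headD []).length - c))
        (runLenA (fun i => pyCellA grid i c) r (grid.length - r)) := by
      have h1 : 1 ≤ runLenA (fun i => pyCellA grid r i) c ((grid.headD []).length - c) := by
        have he : (grid.headD []).length - c = ((grid.headD []).length - c - 1) + 1 := by omega
        rw [he]
        simp only [runLenA]
        rw [if_pos hx]
        have := runLenA_nonneg (fun i => pyCellA grid r i) (c + 1) ((grid.headD []).length - c - 1)
        omega
      exact le_trans h1 (le_max_left _ _)
    have hposB : (0 : Int) < max ((((qOf grid).map runsRightB).getD r []).getD c 0)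
              (((downRowsB (grid.headD []).length (qOf grid)).getD r []).getD c 0) := by
      rw [← hmeq]; omega
    rcases hrest with ⟨hs2, ht2⟩ | ⟨hs2, ht2⟩ <;> simp only at hs2 ht2
    · subst hs2; subst ht2
      simp only [innerA, innerB, if_pos hx, if_pos hq]
      rw [if_pos hposB]
      exact ⟨rfl, Or.inr ⟨by rw [hmeq], by omega⟩⟩
    · subst hs2
      simp only [innerA, innerB, if_pos hx, if_pos hq]
      by_cases hlt : t2 < max (runLenA (fun i => pyCellA grid r i) c ((grid.headD []).length - c))
          (runLenA (fun i => pyCellA grid i c) r (grid.length - r))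
      · rw [if_pos hlt, if_pos (by rw [← hmeq]; exact hlt)]
        exact ⟨rfl, Or.inr ⟨by rw [hmeq], by omega⟩⟩
      · rw [if_neg hlt, if_neg (by rw [← hmeq]; exact hlt)]
        exact ⟨hb, Or.inr ⟨rfl, ht2⟩⟩
  · have hq : ((qOf grid).getD r []).getD c false = false := by
      rw [hcell]; simpa using hx
    simp only [innerA, innerB, if_neg hx, hq, Bool.false_eq_true, if_false]
    exact ⟨hb, hrest⟩

theorem fold_inner_rel (grid : List (List String))
    (hW : ∀ row ∈ grid, (grid.headD []).length ≤ row.length)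
    (r : Nat) (hr : r < grid.length) (cs : List Nat)
    (hcs : ∀ c ∈ cs, c < (grid.headD []).length)
    (s : Option (Int × Int) × Option Int) (t : Option (Int × Int) × Int)
    (hrel : RelSt s t) :
    RelSt (cs.foldl (innerA grid grid.length (grid.headD []).length r) s)
          (cs.foldl (innerB (qOf grid) ((qOf grid).map runsRightB)
                      (downRowsB (grid.headD []).length (qOf grid)) r) t) := by
  induction cs generalizing s t with
  | nil => simpa
  | cons c cs ih =>
    simp only [List.foldl_cons]
    exact ih (fun x hx => hcs x (List.mem_cons_of_mem _ hx))
      _ _ (step_rel grid hW r c hr (hcs c (List.mem_cons_self)) s t hrel)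

theorem fold_outer_rel (grid : List (List String))
    (hW : ∀ row ∈ grid, (grid.headD []).length ≤ row.length)
    (rs : List Nat) (hrs : ∀ r ∈ rs, r < grid.length)
    (s : Option (Int × Int) × Option Int) (t : Option (Int × Int) × Int)
    (hrel : RelSt s t) :
    RelSt (rs.foldl (fun st r => (List.range (grid.headD []).length).foldl
            (innerA grid grid.length (grid.headD []).length r) st) s)
          (rs.foldl (fun st r => (List.range (grid.headD []).length).foldl
            (innerB (qOf grid) ((qOf grid).map runsRightB)
              (downRowsB (grid.headD []).length (qOf grid)) r) st) t) := by
  induction rs generalizing s t with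
  | nil => simpa
  | cons r rs ih =>
    simp only [List.foldl_cons]
    exact ih (fun x hx => hrs x (List.mem_cons_of_mem _ hx)) _ _
      (fold_inner_rel grid hW r (hrs r (List.mem_cons_self)) _
        (fun c hc => (List.mem_range).1 hc) s t hrel)

-- ===== VERDICT (by name: the statement is the Claim_ definition above) =====
theorem select_next_cell_spec : Claim_equal_select_next_cell := by
  intro grid _ hW
  unfold Spec_select_next_cell select_next_cell select_next_cell_alt
  cases grid with
  | nil => rfl
  | cons row0 rest =>
    simp only [List.isEmpty_cons, Bool.false_eq_true, if_false]
    have := fold_outer_rel (row0 :: rest) hW (List.range (row0 :: rest).length)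
      (fun r hr => (List.mem_range).1 hr) (none, none) (none, 0)
      ⟨rfl, Or.inl ⟨rfl, rfl⟩⟩
    exact this.1
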